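-- pv_equiv track=rewrite | github.com/GridTools/gt4py | src/gt4py/storage/cartesian/layout.py | make_gtcpu_ifirst_layout_map
-- ===== SOURCE A (Python) =====
-- from typing import (
--     TYPE_CHECKING,
--     Any,
--     Callable,
--     Dict,
--     Final,
--     Optional,
--     Sequence,
--     Tuple,
--     TypeAlias,
--     TypedDict,
--     Union,
-- )
--
-- def _permute_layout_to_dimensions(
--     layout: Sequence[int], dimensions: Tuple[str, ...]
-- ) -> Tuple[int, ...]:
--     data_dims = [int(d) for d in dimensions if d.isdigit()]
--     canonical_dimensions = [d for d in "IJK" if d in dimensions] + [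
--         str(d) for d in sorted(data_dims)
--     ]
--     res_layout = []
--     for d in dimensions:
--         res_layout.append(layout[canonical_dimensions.index(d)])
--     return tuple(res_layout)
--
-- def make_gtcpu_ifirst_layout_map(dimensions: Tuple[str, ...]) -> Tuple[int, ...]:
--     ctr = reversed(range(len(dimensions)))
--     layout = [next(ctr) for dim in "IJK" if dim in dimensions] + list(ctr)
--     if "K" in dimensions and "J" in dimensions:
--         if "I" in dimensions:
--             layout = [layout[0], layout[2], layout[1], *layout[3:]]
--         else:
--             layout = [layout[1], layout[0], *layout[2:]]
--     return _permute_layout_to_dimensions(layout, dimensions)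
-- ===== SOURCE B (Python) =====
-- def make_gtcpu_ifirst_layout_map(dimensions):
--     # Direct priority ranking: one ordered priority list (I, then K before J
--     # to account for the layout swap, then data dims ascending), descending
--     # ranks along it, then read each input dimension's rank (first match).
--     order = [d for d in "IKJ" if d in dimensions]
--     order += [str(x) for x in sorted(int(d) for d in dimensions if d.isdigit())]
--     n = len(dimensions)
--     ranks = {}
--     for i, d in enumerate(order):
--         ranks.setdefault(d, n - 1 - i)
--     return tuple(ranks[d] for d in dimensions)
-- ===== Notes on version B (the rewrite author's own statement) =====
-- stated objective: simpler
-- what changed: A's counter/iterator consumption, conditional J-K swap and canonical-order permutation helper are collapsed into one priority list (I, K-before-J, sorted data dims) with descending ranks read off a dict.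
import Mathlib
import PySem

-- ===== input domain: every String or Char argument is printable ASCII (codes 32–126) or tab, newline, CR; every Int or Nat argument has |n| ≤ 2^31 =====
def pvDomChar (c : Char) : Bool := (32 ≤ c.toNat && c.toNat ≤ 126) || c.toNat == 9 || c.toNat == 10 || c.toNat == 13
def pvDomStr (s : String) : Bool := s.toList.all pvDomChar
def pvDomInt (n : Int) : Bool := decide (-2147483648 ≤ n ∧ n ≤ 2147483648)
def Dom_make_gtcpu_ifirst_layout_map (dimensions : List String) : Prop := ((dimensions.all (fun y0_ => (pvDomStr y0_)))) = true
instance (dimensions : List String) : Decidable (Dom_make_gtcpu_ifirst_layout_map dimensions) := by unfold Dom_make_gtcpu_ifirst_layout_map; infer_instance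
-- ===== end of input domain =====

-- B replaces A's iterator/swap/permute pipeline by one priority list with descending first-occurrence ranks (simpler decomposition, same results).
-- ===== PORT A =====
-- int(d); exact here: only applied to strings with strIsdigit = true (ASCII domain), where ofStr? succeeds
def pvInt (d : String) : Int := (PySem.Int.ofStr? d).getD 0

-- one step of the iterator consumption '[next(ctr) for dim in "IJK" if dim in dimensions]'
def pvStep (dimensions : List String) (st : List Int × List Int) (dim : String) : List Int × List Int :=
  if dimensions.contains dim then
    match st.2 with
    | c :: rest => (st.1 ++ [c], rest)
    | [] => st        -- next() on an exhausted iterator: unreachable (at most 3 dims consumed, each occurring in dimensions)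
  else st

-- the 'if "K" in dimensions and "J" in dimensions: ...' reshuffle of layout
def pvSwap (dimensions : List String) (layout : List Int) : List Int :=
  if dimensions.contains "K" && dimensions.contains "J" then
    if dimensions.contains "I" then
      match layout with
      | a :: b :: c :: rest => a :: c :: b :: rest
      | l => l
    else
      match layout with
      | a :: b :: rest => b :: a :: rest
      | l => l
  else layout

def pvPermuteLayoutToDimensions (layout : List Int) (dimensions : List String) : List Int :=
  let data_dims := (dimensions.filter (fun d => PySem.Str.strIsdigit d)).map pvInt
  let canonical := (["I", "J", "K"].filter (fun c => dimensions.contains c)) ++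
      (PySem.List.sorted data_dims (fun x => x)).map PySem.Int.toStr
  dimensions.map (fun d =>
    match PySem.List.index? canonical d with
    | some i => layout.getD i 0    -- layout[i]; i is in range under Pre_
    | none => 0)                   -- list.index ValueError: excluded by Pre_

def make_gtcpu_ifirst_layout_map (dimensions : List String) : List Int :=
  let n : Int := dimensions.length
  let ctr := (PySem.List.pyRange 0 n 1).reverse
  let st := ["I", "J", "K"].foldl (pvStep dimensions) ([], ctr)
  let layout := st.1 ++ st.2
  pvPermuteLayoutToDimensions (pvSwap dimensions layout) dimensions

-- ===== PORT B =====
def make_gtcpu_ifirst_layout_map_alt (dimensions : List String) : List Int :=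
  let order := (["I", "K", "J"].filter (fun c => dimensions.contains c)) ++
      (PySem.List.sorted ((dimensions.filter (fun d => PySem.Str.strIsdigit d)).map pvInt) (fun x => x)).map PySem.Int.toStr
  let n : Int := dimensions.length
  let ranks := (PySem.List.enumerate order).foldl
      (fun (r : PySem.Dict String Int) p => r.setdefault p.2 (n - 1 - p.1)) PySem.Dict.empty
  dimensions.map (fun d => (ranks.get? d).getD 0)   -- ranks[d] KeyError: excluded by Pre_

-- ===== PRECONDITION & SPEC =====
-- Pre_ admits exactly the inputs on which A returns: every entry is "I", "J", "K", or a canonical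
-- decimal digit string (isdigit and str(int(d)) == d); on any other entry A's list.index raises
-- ValueError (and B's dict lookup raises KeyError).
def pvGoodDim (d : String) : Bool :=
  d == "I" || d == "J" || d == "K" ||
  (PySem.Str.strIsdigit d && PySem.Int.toStr ((PySem.Int.ofStr? d).getD 0) == d)

def Pre_make_gtcpu_ifirst_layout_map (dimensions : List String) : Prop :=
  dimensions.all pvGoodDim = true
instance (dimensions : List String) : Decidable (Pre_make_gtcpu_ifirst_layout_map dimensions) := by
  unfold Pre_make_gtcpu_ifirst_layout_map; infer_instance

def pvWitness_make_gtcpu_ifirst_layout_map : List String := ["K", "J", "10", "0"]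

def Spec_make_gtcpu_ifirst_layout_map (dimensions : List String) (out : List Int) : Prop := out = make_gtcpu_ifirst_layout_map_alt dimensions
instance (dimensions : List String) (out : List Int) : Decidable (Spec_make_gtcpu_ifirst_layout_map dimensions out) := by unfold Spec_make_gtcpu_ifirst_layout_map; infer_instance

-- ===== CLAIM (what is proved, stated in full; the proofs are below) =====
def Claim_equal_make_gtcpu_ifirst_layout_map : Prop := ∀ (dimensions : List String), Dom_make_gtcpu_ifirst_layout_map dimensions → Pre_make_gtcpu_ifirst_layout_map dimensions → Spec_make_gtcpu_ifirst_layout_map dimensions (make_gtcpu_ifirst_layout_map dimensions)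

-- ===== LEMMAS AND PROOFS =====

-- the iterator-consuming fold only moves elements from the second component to the first
lemma pvStep_concat (dimensions : List String) (l : List String) (p : List Int × List Int) :
    (l.foldl (pvStep dimensions) p).1 ++ (l.foldl (pvStep dimensions) p).2 = p.1 ++ p.2 := by
  induction l generalizing p with
  | nil => rfl
  | cons x xs ih =>
      rw [List.foldl_cons, ih]
      unfold pvStep
      split
      · split <;> simp_all
      · rfl

-- the setdefault loop builds first-occurrence ranks
lemma pvRanks_get (n : Int) (l : List String) (s : Int) (acc : PySem.Dict String Int) (d : String) :
    ((PySem.List.enumerate l s).foldl (fun r p => r.setdefault p.2 (n - 1 - p.1)) acc).get? d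
      = ((acc.get? d).or ((PySem.List.index? l d).map (fun i : Nat => n - 1 - (s + (i : Int))))) := by
  induction l generalizing s acc with
  | nil =>
      simp [PySem.List.enumerate_nil, PySem.List.index?_eq_idxOf?]
  | cons x xs ih =>
      rw [PySem.List.enumerate_cons, List.foldl_cons, ih]
      dsimp only
      by_cases hdx : d = x
      · subst hdx
        rw [PySem.Dict.get?_setdefault_self]
        rw [PySem.List.index?_cons_self]
        cases hg : acc.get? d <;> simp [Option.or]
      · rw [PySem.Dict.get?_setdefault_of_ne (hne := hdx)]
        rw [PySem.List.index?_cons_of_ne]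
        · rw [Option.map_map]
          have hf : (fun i : Nat => n - 1 - (s + 1 + (i : Int)))
              = (fun i : Nat => n - 1 - (s + (i : Int))) ∘ (fun x => x + 1) := by
            funext i; simp; ring
          rw [hf]
        · exact Ne.symm hdx

lemma pvSwap_getD_111 (dims : List String) (hK : dims.contains "K" = true)
    (hJ : dims.contains "J" = true) (hI : dims.contains "I" = true)
    (l : List Int) (hl : 3 ≤ l.length) (i : Nat) :
    (pvSwap dims l).getD i 0 = l.getD (if i = 1 then 2 else if i = 2 then 1 else i) 0 := by
  unfold pvSwap
  rw [hK, hJ, hI]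
  rcases l with _ | ⟨a, _ | ⟨b, _ | ⟨c, r⟩⟩⟩ <;> simp at hl ⊢
  rcases i with _ | _ | _ | i
  · rfl
  · rfl
  · rfl
  · rw [if_neg (by omega), if_neg (by omega)]
    simp

lemma pvSwap_getD_110 (dims : List String) (hK : dims.contains "K" = true)
    (hJ : dims.contains "J" = true) (hI : dims.contains "I" = false)
    (l : List Int) (hl : 2 ≤ l.length) (i : Nat) :
    (pvSwap dims l).getD i 0 = l.getD (if i = 0 then 1 else if i = 1 then 0 else i) 0 := by
  unfold pvSwap
  rw [hK, hJ, hI]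
  rcases l with _ | ⟨a, _ | ⟨b, r⟩⟩ <;> simp at hl ⊢
  rcases i with _ | _ | i
  · rfl
  · rfl
  · rw [if_neg (by omega), if_neg (by omega)]
    simp

lemma pvSwap_id (dims : List String) (l : List Int)
    (h : dims.contains "K" = false ∨ dims.contains "J" = false) :
    pvSwap dims l = l := by
  unfold pvSwap
  rcases h with h | h <;> rw [h] <;> simp

lemma pvCtr_getD (m i : Nat) (h : i < m) :
    ((PySem.List.pyRange 0 (m : Int) 1).reverse).getD i 0 = (m : Int) - 1 - i := by
  rw [PySem.List.pyRange_one]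
  simp only [Int.sub_zero, Int.toNat_natCast, zero_add]
  rw [List.getD_eq_getElem?_getD]
  rw [List.getElem?_reverse (by simpa using h)]
  rw [List.getElem?_map, List.getElem?_range (by simp; omega)]
  simp
  omega

lemma pvIdxCons (x v : String) (t : List String) :
    PySem.List.index? (x :: t) v = if x = v then some 0 else (PySem.List.index? t v).map (· + 1) := by
  by_cases h : x = v
  · subst h; rw [if_pos rfl, PySem.List.index?_cons_self]
  · rw [if_neg h, PySem.List.index?_cons_of_ne _ h]

lemma pvNotDigit_of_ijk : PySem.Str.strIsdigit "I" = false ∧ PySem.Str.strIsdigit "J" = false ∧ PySem.Str.strIsdigit "K" = false := by decide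

lemma pvCount_aux (dims : List String) (h : ∀ d ∈ dims, pvGoodDim d = true) :
    ((if "I" ∈ dims then 1 else 0) + (if "J" ∈ dims then 1 else 0) + (if "K" ∈ dims then 1 else 0))
      + dims.countP (fun d => PySem.Str.strIsdigit d) ≤ dims.length := by
  induction dims with
  | nil => simp
  | cons d rest ih =>
      have hd := h d (List.mem_cons_self)
      have hr := ih (fun x hx => h x (List.mem_cons_of_mem _ hx))
      unfold pvGoodDim at hd
      simp only [Bool.or_eq_true, beq_iff_eq, Bool.and_eq_true] at hd
      rw [List.countP_cons]
      simp only [List.mem_cons, List.length_cons]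
      have hI := pvNotDigit_of_ijk.1
      have hJ := pvNotDigit_of_ijk.2.1
      have hK := pvNotDigit_of_ijk.2.2
      rcases hd with ((rfl | rfl) | rfl) | ⟨hdig, -⟩
      · by_cases hIr : "I" ∈ rest <;> by_cases hJr : "J" ∈ rest <;> by_cases hKr : "K" ∈ rest <;>
          simp_all <;> omega
      · by_cases hIr : "I" ∈ rest <;> by_cases hJr : "J" ∈ rest <;> by_cases hKr : "K" ∈ rest <;>
          simp_all <;> omega
      · by_cases hIr : "I" ∈ rest <;> by_cases hJr : "J" ∈ rest <;> by_cases hKr : "K" ∈ rest <;>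
          simp_all <;> omega
      · have h1 : ¬("I" = d) := by rintro rfl; exact absurd hdig (by decide)
        have h2 : ¬("J" = d) := by rintro rfl; exact absurd hdig (by decide)
        have h3 : ¬("K" = d) := by rintro rfl; exact absurd hdig (by decide)
        by_cases hIr : "I" ∈ rest <;> by_cases hJr : "J" ∈ rest <;> by_cases hKr : "K" ∈ rest <;>
          simp_all <;> omega

lemma pvMain (dimensions : List String) (hpre : ∀ x ∈ dimensions, pvGoodDim x = true)
    (d : String) (hd : d ∈ dimensions) :
    (match
      PySem.List.index?
        (List.filter (fun c => dimensions.contains c) ["I", "J", "K"] ++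
          List.map PySem.Int.toStr
            (PySem.List.sorted (List.map pvInt (List.filter (fun d => PySem.Str.strIsdigit d) dimensions)) fun x => x))
        d with
    | some i => (pvSwap dimensions (PySem.List.pyRange 0 (dimensions.length : Int) 1).reverse).getD i 0
    | none => 0) =
    (Option.map (fun i : Nat => (dimensions.length : Int) - 1 - (0 + (i : Int)))
          (PySem.List.index?
            (List.filter (fun c => dimensions.contains c) ["I", "K", "J"] ++
              List.map PySem.Int.toStr
                (PySem.List.sorted (List.map pvInt (List.filter (fun d => PySem.Str.strIsdigit d) dimensions)) fun x =>
                  x))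
            d)).getD
      0 := by
  have hcount := pvCount_aux dimensions hpre
  set S := List.map PySem.Int.toStr
      (PySem.List.sorted (List.map pvInt (List.filter (fun d => PySem.Str.strIsdigit d) dimensions)) fun x => x)
    with hSdef
  have hSlen : S.length = dimensions.countP (fun x => PySem.Str.strIsdigit x) := by
    rw [hSdef]
    rw [List.length_map, PySem.List.length_sorted, List.length_map, List.countP_eq_length_filter]
  have hgood := hpre d hd
  unfold pvGoodDim at hgood
  simp only [Bool.or_eq_true, beq_iff_eq, Bool.and_eq_true] at hgood
  rcases hgood with ((rfl | rfl) | rfl) | ⟨hdig, hround⟩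
  · -- d = "I"
    have hIm : "I" ∈ dimensions := hd
    have hm1 : 1 ≤ dimensions.length := List.length_pos_iff.mpr (List.ne_nil_of_mem hd)
    by_cases hJm : "J" ∈ dimensions <;> by_cases hKm : "K" ∈ dimensions
    · -- J:True K:True
      have hI : dimensions.contains "I" = true := List.contains_iff_mem.mpr hIm
      have hJ : dimensions.contains "J" = true := List.contains_iff_mem.mpr hJm
      have hK : dimensions.contains "K" = true := List.contains_iff_mem.mpr hKm
      simp only [hIm, hJm, hKm, not_false_iff, ite_true, ite_false, if_true, if_false, reduceIte] at hcount
      simp only [List.filter_cons, List.filter_nil, hI, hJ, hK, if_true, Bool.false_eq_true,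
        if_false, List.cons_append, List.nil_append, pvIdxCons, String.reduceEq, ite_false,
        ite_true, Nat.reduceAdd, Option.map_some, Option.getD_some]
      try dsimp only
      rw [pvSwap_getD_111 dimensions hK hJ hI _ (by simp [PySem.List.pyRange_one]; omega) _]
      rw [if_neg (by omega), if_neg (by omega), pvCtr_getD _ 0 (by omega)]
      push_cast; ring
    · -- J:True K:False
      have hI : dimensions.contains "I" = true := List.contains_iff_mem.mpr hIm
      have hJ : dimensions.contains "J" = true := List.contains_iff_mem.mpr hJm
      have hK : dimensions.contains "K" = false := Bool.eq_false_iff.mpr (fun h => hKm (List.contains_iff_mem.mp h))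
      simp only [hIm, hJm, hKm, not_false_iff, ite_true, ite_false, if_true, if_false, reduceIte] at hcount
      simp only [List.filter_cons, List.filter_nil, hI, hJ, hK, if_true, Bool.false_eq_true,
        if_false, List.cons_append, List.nil_append, pvIdxCons, String.reduceEq, ite_false,
        ite_true, Nat.reduceAdd, Option.map_some, Option.getD_some]
      try dsimp only
      rw [pvSwap_id _ _ (Or.inl hK)]
      rw [pvCtr_getD _ 0 (by omega)]
      push_cast; ring
    · -- J:False K:True
      have hI : dimensions.contains "I" = true := List.contains_iff_mem.mpr hIm
      have hJ : dimensions.contains "J" = false := Bool.eq_false_iff.mpr (fun h => hJm (List.contains_iff_mem.mp h))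
      have hK : dimensions.contains "K" = true := List.contains_iff_mem.mpr hKm
      simp only [hIm, hJm, hKm, not_false_iff, ite_true, ite_false, if_true, if_false, reduceIte] at hcount
      simp only [List.filter_cons, List.filter_nil, hI, hJ, hK, if_true, Bool.false_eq_true,
        if_false, List.cons_append, List.nil_append, pvIdxCons, String.reduceEq, ite_false,
        ite_true, Nat.reduceAdd, Option.map_some, Option.getD_some]
      try dsimp only
      rw [pvSwap_id _ _ (Or.inr hJ)]
      rw [pvCtr_getD _ 0 (by omega)]
      push_cast; ring
    · -- J:False K:False
      have hI : dimensions.contains "I" = true := List.contains_iff_mem.mpr hIm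
      have hJ : dimensions.contains "J" = false := Bool.eq_false_iff.mpr (fun h => hJm (List.contains_iff_mem.mp h))
      have hK : dimensions.contains "K" = false := Bool.eq_false_iff.mpr (fun h => hKm (List.contains_iff_mem.mp h))
      simp only [hIm, hJm, hKm, not_false_iff, ite_true, ite_false, if_true, if_false, reduceIte] at hcount
      simp only [List.filter_cons, List.filter_nil, hI, hJ, hK, if_true, Bool.false_eq_true,
        if_false, List.cons_append, List.nil_append, pvIdxCons, String.reduceEq, ite_false,
        ite_true, Nat.reduceAdd, Option.map_some, Option.getD_some]
      try dsimp only
      rw [pvSwap_id _ _ (Or.inl hK)]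
      rw [pvCtr_getD _ 0 (by omega)]
      push_cast; ring
  · -- d = "J"
    have hJm : "J" ∈ dimensions := hd
    have hm1 : 1 ≤ dimensions.length := List.length_pos_iff.mpr (List.ne_nil_of_mem hd)
    by_cases hIm : "I" ∈ dimensions <;> by_cases hKm : "K" ∈ dimensions
    · -- I:True K:True
      have hJ : dimensions.contains "J" = true := List.contains_iff_mem.mpr hJm
      have hI : dimensions.contains "I" = true := List.contains_iff_mem.mpr hIm
      have hK : dimensions.contains "K" = true := List.contains_iff_mem.mpr hKm
      simp only [hIm, hJm, hKm, not_false_iff, ite_true, ite_false, if_true, if_false, reduceIte] at hcount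
      simp only [List.filter_cons, List.filter_nil, hI, hJ, hK, if_true, Bool.false_eq_true,
        if_false, List.cons_append, List.nil_append, pvIdxCons, String.reduceEq, ite_false,
        ite_true, Nat.reduceAdd, Option.map_some, Option.getD_some]
      try dsimp only
      rw [pvSwap_getD_111 dimensions hK hJ hI _ (by simp [PySem.List.pyRange_one]; omega) _]
      rw [if_pos rfl, pvCtr_getD _ 2 (by omega)]
      push_cast; ring
    · -- I:True K:False
      have hJ : dimensions.contains "J" = true := List.contains_iff_mem.mpr hJm
      have hI : dimensions.contains "I" = true := List.contains_iff_mem.mpr hIm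
      have hK : dimensions.contains "K" = false := Bool.eq_false_iff.mpr (fun h => hKm (List.contains_iff_mem.mp h))
      simp only [hIm, hJm, hKm, not_false_iff, ite_true, ite_false, if_true, if_false, reduceIte] at hcount
      simp only [List.filter_cons, List.filter_nil, hI, hJ, hK, if_true, Bool.false_eq_true,
        if_false, List.cons_append, List.nil_append, pvIdxCons, String.reduceEq, ite_false,
        ite_true, Nat.reduceAdd, Option.map_some, Option.getD_some]
      try dsimp only
      rw [pvSwap_id _ _ (Or.inl hK)]
      rw [pvCtr_getD _ 1 (by omega)]
      push_cast; ring
    · -- I:False K:True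
      have hJ : dimensions.contains "J" = true := List.contains_iff_mem.mpr hJm
      have hI : dimensions.contains "I" = false := Bool.eq_false_iff.mpr (fun h => hIm (List.contains_iff_mem.mp h))
      have hK : dimensions.contains "K" = true := List.contains_iff_mem.mpr hKm
      simp only [hIm, hJm, hKm, not_false_iff, ite_true, ite_false, if_true, if_false, reduceIte] at hcount
      simp only [List.filter_cons, List.filter_nil, hI, hJ, hK, if_true, Bool.false_eq_true,
        if_false, List.cons_append, List.nil_append, pvIdxCons, String.reduceEq, ite_false,
        ite_true, Nat.reduceAdd, Option.map_some, Option.getD_some]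
      try dsimp only
      rw [pvSwap_getD_110 dimensions hK hJ hI _ (by simp [PySem.List.pyRange_one]; omega) _]
      rw [if_pos rfl, pvCtr_getD _ 1 (by omega)]
      push_cast; ring
    · -- I:False K:False
      have hJ : dimensions.contains "J" = true := List.contains_iff_mem.mpr hJm
      have hI : dimensions.contains "I" = false := Bool.eq_false_iff.mpr (fun h => hIm (List.contains_iff_mem.mp h))
      have hK : dimensions.contains "K" = false := Bool.eq_false_iff.mpr (fun h => hKm (List.contains_iff_mem.mp h))
      simp only [hIm, hJm, hKm, not_false_iff, ite_true, ite_false, if_true, if_false, reduceIte] at hcount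
      simp only [List.filter_cons, List.filter_nil, hI, hJ, hK, if_true, Bool.false_eq_true,
        if_false, List.cons_append, List.nil_append, pvIdxCons, String.reduceEq, ite_false,
        ite_true, Nat.reduceAdd, Option.map_some, Option.getD_some]
      try dsimp only
      rw [pvSwap_id _ _ (Or.inl hK)]
      rw [pvCtr_getD _ 0 (by omega)]
      push_cast; ring
  · -- d = "K"
    have hKm : "K" ∈ dimensions := hd
    have hm1 : 1 ≤ dimensions.length := List.length_pos_iff.mpr (List.ne_nil_of_mem hd)
    by_cases hIm : "I" ∈ dimensions <;> by_cases hJm : "J" ∈ dimensions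
    · -- I:True J:True
      have hK : dimensions.contains "K" = true := List.contains_iff_mem.mpr hKm
      have hI : dimensions.contains "I" = true := List.contains_iff_mem.mpr hIm
      have hJ : dimensions.contains "J" = true := List.contains_iff_mem.mpr hJm
      simp only [hIm, hJm, hKm, not_false_iff, ite_true, ite_false, if_true, if_false, reduceIte] at hcount
      simp only [List.filter_cons, List.filter_nil, hI, hJ, hK, if_true, Bool.false_eq_true,
        if_false, List.cons_append, List.nil_append, pvIdxCons, String.reduceEq, ite_false,
        ite_true, Nat.reduceAdd, Option.map_some, Option.getD_some]
      try dsimp only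
      rw [pvSwap_getD_111 dimensions hK hJ hI _ (by simp [PySem.List.pyRange_one]; omega) _]
      rw [if_neg (by omega), if_pos rfl, pvCtr_getD _ 1 (by omega)]
      push_cast; ring
    · -- I:True J:False
      have hK : dimensions.contains "K" = true := List.contains_iff_mem.mpr hKm
      have hI : dimensions.contains "I" = true := List.contains_iff_mem.mpr hIm
      have hJ : dimensions.contains "J" = false := Bool.eq_false_iff.mpr (fun h => hJm (List.contains_iff_mem.mp h))
      simp only [hIm, hJm, hKm, not_false_iff, ite_true, ite_false, if_true, if_false, reduceIte] at hcount
      simp only [List.filter_cons, List.filter_nil, hI, hJ, hK, if_true, Bool.false_eq_true,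
        if_false, List.cons_append, List.nil_append, pvIdxCons, String.reduceEq, ite_false,
        ite_true, Nat.reduceAdd, Option.map_some, Option.getD_some]
      try dsimp only
      rw [pvSwap_id _ _ (Or.inr hJ)]
      rw [pvCtr_getD _ 1 (by omega)]
      push_cast; ring
    · -- I:False J:True
      have hK : dimensions.contains "K" = true := List.contains_iff_mem.mpr hKm
      have hI : dimensions.contains "I" = false := Bool.eq_false_iff.mpr (fun h => hIm (List.contains_iff_mem.mp h))
      have hJ : dimensions.contains "J" = true := List.contains_iff_mem.mpr hJm
      simp only [hIm, hJm, hKm, not_false_iff, ite_true, ite_false, if_true, if_false, reduceIte] at hcount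
      simp only [List.filter_cons, List.filter_nil, hI, hJ, hK, if_true, Bool.false_eq_true,
        if_false, List.cons_append, List.nil_append, pvIdxCons, String.reduceEq, ite_false,
        ite_true, Nat.reduceAdd, Option.map_some, Option.getD_some]
      try dsimp only
      rw [pvSwap_getD_110 dimensions hK hJ hI _ (by simp [PySem.List.pyRange_one]; omega) _]
      rw [if_neg (by omega), if_pos rfl, pvCtr_getD _ 0 (by omega)]
      push_cast; ring
    · -- I:False J:False
      have hK : dimensions.contains "K" = true := List.contains_iff_mem.mpr hKm
      have hI : dimensions.contains "I" = false := Bool.eq_false_iff.mpr (fun h => hIm (List.contains_iff_mem.mp h))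
      have hJ : dimensions.contains "J" = false := Bool.eq_false_iff.mpr (fun h => hJm (List.contains_iff_mem.mp h))
      simp only [hIm, hJm, hKm, not_false_iff, ite_true, ite_false, if_true, if_false, reduceIte] at hcount
      simp only [List.filter_cons, List.filter_nil, hI, hJ, hK, if_true, Bool.false_eq_true,
        if_false, List.cons_append, List.nil_append, pvIdxCons, String.reduceEq, ite_false,
        ite_true, Nat.reduceAdd, Option.map_some, Option.getD_some]
      try dsimp only
      rw [pvSwap_id _ _ (Or.inr hJ)]
      rw [pvCtr_getD _ 0 (by omega)]
      push_cast; ring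
  · -- d is a canonical digit string
    have hne1 : ¬(("I":String) = d) := by rintro rfl; exact absurd hdig (by decide)
    have hne2 : ¬(("J":String) = d) := by rintro rfl; exact absurd hdig (by decide)
    have hne3 : ¬(("K":String) = d) := by rintro rfl; exact absurd hdig (by decide)
    have hdS : d ∈ S := by
      rw [hSdef]
      refine List.mem_map.mpr ⟨pvInt d, ?_, by simpa [pvInt] using hround⟩
      exact (PySem.List.mem_sorted _ _ _ _).mpr (List.mem_map.mpr ⟨d, List.mem_filter.mpr ⟨hd, hdig⟩, rfl⟩)
    obtain ⟨j, hj⟩ := Option.isSome_iff_exists.mp ((PySem.List.index?_isSome_iff S d).mpr hdS)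
    obtain ⟨hjlt, -, -⟩ := PySem.List.getElem_of_index?_eq_some hj
    rw [hSlen] at hjlt
    by_cases hIm : "I" ∈ dimensions <;> by_cases hJm : "J" ∈ dimensions <;> by_cases hKm : "K" ∈ dimensions
    · -- I:True J:True K:True
      have hI : dimensions.contains "I" = true := List.contains_iff_mem.mpr hIm
      have hJ : dimensions.contains "J" = true := List.contains_iff_mem.mpr hJm
      have hK : dimensions.contains "K" = true := List.contains_iff_mem.mpr hKm
      simp only [hIm, hJm, hKm, not_false_iff, ite_true, ite_false, if_true, if_false, reduceIte] at hcount
      simp only [List.filter_cons, List.filter_nil, hI, hJ, hK, if_true, Bool.false_eq_true,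
        if_false, List.cons_append, List.nil_append, pvIdxCons, hne1, hne2, hne3, ite_false,
        hj, Option.map_some, Option.getD_some]
      try dsimp only
      rw [pvSwap_getD_111 dimensions hK hJ hI _ (by simp [PySem.List.pyRange_one]; omega) _]
      rw [if_neg (by omega), if_neg (by omega), pvCtr_getD _ _ (by omega)]
      push_cast; ring
    · -- I:True J:True K:False
      have hI : dimensions.contains "I" = true := List.contains_iff_mem.mpr hIm
      have hJ : dimensions.contains "J" = true := List.contains_iff_mem.mpr hJm
      have hK : dimensions.contains "K" = false := Bool.eq_false_iff.mpr (fun h => hKm (List.contains_iff_mem.mp h))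
      simp only [hIm, hJm, hKm, not_false_iff, ite_true, ite_false, if_true, if_false, reduceIte] at hcount
      simp only [List.filter_cons, List.filter_nil, hI, hJ, hK, if_true, Bool.false_eq_true,
        if_false, List.cons_append, List.nil_append, pvIdxCons, hne1, hne2, hne3, ite_false,
        hj, Option.map_some, Option.getD_some]
      try dsimp only
      rw [pvSwap_id _ _ (Or.inl hK)]
      rw [pvCtr_getD _ _ (by omega)]
      push_cast; ring
    · -- I:True J:False K:True
      have hI : dimensions.contains "I" = true := List.contains_iff_mem.mpr hIm
      have hJ : dimensions.contains "J" = false := Bool.eq_false_iff.mpr (fun h => hJm (List.contains_iff_mem.mp h))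
      have hK : dimensions.contains "K" = true := List.contains_iff_mem.mpr hKm
      simp only [hIm, hJm, hKm, not_false_iff, ite_true, ite_false, if_true, if_false, reduceIte] at hcount
      simp only [List.filter_cons, List.filter_nil, hI, hJ, hK, if_true, Bool.false_eq_true,
        if_false, List.cons_append, List.nil_append, pvIdxCons, hne1, hne2, hne3, ite_false,
        hj, Option.map_some, Option.getD_some]
      try dsimp only
      rw [pvSwap_id _ _ (Or.inr hJ)]
      rw [pvCtr_getD _ _ (by omega)]
      push_cast; ring
    · -- I:True J:False K:False
      have hI : dimensions.contains "I" = true := List.contains_iff_mem.mpr hIm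
      have hJ : dimensions.contains "J" = false := Bool.eq_false_iff.mpr (fun h => hJm (List.contains_iff_mem.mp h))
      have hK : dimensions.contains "K" = false := Bool.eq_false_iff.mpr (fun h => hKm (List.contains_iff_mem.mp h))
      simp only [hIm, hJm, hKm, not_false_iff, ite_true, ite_false, if_true, if_false, reduceIte] at hcount
      simp only [List.filter_cons, List.filter_nil, hI, hJ, hK, if_true, Bool.false_eq_true,
        if_false, List.cons_append, List.nil_append, pvIdxCons, hne1, hne2, hne3, ite_false,
        hj, Option.map_some, Option.getD_some]
      try dsimp only
      rw [pvSwap_id _ _ (Or.inl hK)]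
      rw [pvCtr_getD _ _ (by omega)]
      push_cast; ring
    · -- I:False J:True K:True
      have hI : dimensions.contains "I" = false := Bool.eq_false_iff.mpr (fun h => hIm (List.contains_iff_mem.mp h))
      have hJ : dimensions.contains "J" = true := List.contains_iff_mem.mpr hJm
      have hK : dimensions.contains "K" = true := List.contains_iff_mem.mpr hKm
      simp only [hIm, hJm, hKm, not_false_iff, ite_true, ite_false, if_true, if_false, reduceIte] at hcount
      simp only [List.filter_cons, List.filter_nil, hI, hJ, hK, if_true, Bool.false_eq_true,
        if_false, List.cons_append, List.nil_append, pvIdxCons, hne1, hne2, hne3, ite_false,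
        hj, Option.map_some, Option.getD_some]
      try dsimp only
      rw [pvSwap_getD_110 dimensions hK hJ hI _ (by simp [PySem.List.pyRange_one]; omega) _]
      rw [if_neg (by omega), if_neg (by omega), pvCtr_getD _ _ (by omega)]
      push_cast; ring
    · -- I:False J:True K:False
      have hI : dimensions.contains "I" = false := Bool.eq_false_iff.mpr (fun h => hIm (List.contains_iff_mem.mp h))
      have hJ : dimensions.contains "J" = true := List.contains_iff_mem.mpr hJm
      have hK : dimensions.contains "K" = false := Bool.eq_false_iff.mpr (fun h => hKm (List.contains_iff_mem.mp h))
      simp only [hIm, hJm, hKm, not_false_iff, ite_true, ite_false, if_true, if_false, reduceIte] at hcount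
      simp only [List.filter_cons, List.filter_nil, hI, hJ, hK, if_true, Bool.false_eq_true,
        if_false, List.cons_append, List.nil_append, pvIdxCons, hne1, hne2, hne3, ite_false,
        hj, Option.map_some, Option.getD_some]
      try dsimp only
      rw [pvSwap_id _ _ (Or.inl hK)]
      rw [pvCtr_getD _ _ (by omega)]
      push_cast; ring
    · -- I:False J:False K:True
      have hI : dimensions.contains "I" = false := Bool.eq_false_iff.mpr (fun h => hIm (List.contains_iff_mem.mp h))
      have hJ : dimensions.contains "J" = false := Bool.eq_false_iff.mpr (fun h => hJm (List.contains_iff_mem.mp h))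
      have hK : dimensions.contains "K" = true := List.contains_iff_mem.mpr hKm
      simp only [hIm, hJm, hKm, not_false_iff, ite_true, ite_false, if_true, if_false, reduceIte] at hcount
      simp only [List.filter_cons, List.filter_nil, hI, hJ, hK, if_true, Bool.false_eq_true,
        if_false, List.cons_append, List.nil_append, pvIdxCons, hne1, hne2, hne3, ite_false,
        hj, Option.map_some, Option.getD_some]
      try dsimp only
      rw [pvSwap_id _ _ (Or.inr hJ)]
      rw [pvCtr_getD _ _ (by omega)]
      push_cast; ring
    · -- I:False J:False K:False
      have hI : dimensions.contains "I" = false := Bool.eq_false_iff.mpr (fun h => hIm (List.contains_iff_mem.mp h))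
      have hJ : dimensions.contains "J" = false := Bool.eq_false_iff.mpr (fun h => hJm (List.contains_iff_mem.mp h))
      have hK : dimensions.contains "K" = false := Bool.eq_false_iff.mpr (fun h => hKm (List.contains_iff_mem.mp h))
      simp only [hIm, hJm, hKm, not_false_iff, ite_true, ite_false, if_true, if_false, reduceIte] at hcount
      simp only [List.filter_cons, List.filter_nil, hI, hJ, hK, if_true, Bool.false_eq_true,
        if_false, List.cons_append, List.nil_append, pvIdxCons, hne1, hne2, hne3, ite_false,
        hj, Option.map_some, Option.getD_some]
      try dsimp only
      rw [pvSwap_id _ _ (Or.inl hK)]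
      rw [pvCtr_getD _ _ (by omega)]
      push_cast; ring

-- ===== VERDICT (by name: the statement is the Claim_ definition above) =====
theorem make_gtcpu_ifirst_layout_map_spec : Claim_equal_make_gtcpu_ifirst_layout_map := by
  intro dimensions hdom hpre
  unfold Spec_make_gtcpu_ifirst_layout_map
  unfold make_gtcpu_ifirst_layout_map make_gtcpu_ifirst_layout_map_alt pvPermuteLayoutToDimensions
  simp only [pvStep_concat, List.nil_append, pvRanks_get, PySem.Dict.get?_empty, Option.none_or]
  apply List.map_congr_left
  intro d hd
  exact pvMain dimensions (List.all_eq_true.mp hpre) d hd
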